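-- pv_equiv track=rewrite | github.com/Hompeaz/DeerMes | src/deermes/tui.py | _wrap_display_text
-- ===== SOURCE A (Python) =====
-- import unicodedata
--
-- def _wrap_display_text(text: str, width: int, preserve_trailing: bool) -> list[str]:
--     width = max(width, 1)
--     lines: list[str] = []
--     current = ''
--     current_width = 0
--
--     for char in text:
--         if char == '\n':
--             lines.append(current if preserve_trailing else current.rstrip())
--             current = ''
--             current_width = 0
--             continue
--
--         chunk = '    ' if char == '\t' else char
--         for item in chunk:
--             item_width = _char_cell_width(item)
--             if current and current_width + item_width > width:
--                 lines.append(current if preserve_trailing else current.rstrip())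
--                 current = ''
--                 current_width = 0
--             current += item
--             current_width += item_width
--
--     if current or not lines:
--         lines.append(current if preserve_trailing else current.rstrip())
--     return lines
--
-- def _char_cell_width(char: str) -> int:
--     if char == '\t':
--         return 4
--     if char in {'\n', '\r'}:
--         return 0
--     if unicodedata.combining(char):
--         return 0
--     return 2 if unicodedata.east_asian_width(char) in {'W', 'F'} else 1
-- ===== SOURCE B (Python) =====
-- import unicodedata
--
--
-- def _char_cell_width(char: str) -> int:
--     if char == '\t':
--         return 4
--     if char in {'\n', '\r'}:
--         return 0
--     if unicodedata.combining(char):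
--         return 0
--     return 2 if unicodedata.east_asian_width(char) in {'W', 'F'} else 1
--
--
-- def _wrap_segment(seg: str, width: int, preserve_trailing: bool):
--     """Greedily wrap one newline-free segment; return (completed lines, raw leftover)."""
--     expanded = ''.join('    ' if ch == '\t' else ch for ch in seg)
--     done: list[str] = []
--     cur = ''
--     cw = 0
--     for ch in expanded:
--         w = _char_cell_width(ch)
--         if cur and cw + w > width:
--             done.append(cur if preserve_trailing else cur.rstrip())
--             cur = ch
--             cw = w
--         else:
--             cur += ch
--             cw += w
--     return done, cur
--
--
-- def _wrap_display_text(text: str, width: int, preserve_trailing: bool) -> list[str]: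
--     width = max(width, 1)
--     segs = text.split('\n')
--     lines: list[str] = []
--     for seg in segs[:-1]:
--         done, rest = _wrap_segment(seg, width, preserve_trailing)
--         lines += done
--         lines.append(rest if preserve_trailing else rest.rstrip())
--     done, rest = _wrap_segment(segs[-1], width, preserve_trailing)
--     lines += done
--     if rest or not lines:
--         lines.append(rest if preserve_trailing else rest.rstrip())
--     return lines
-- ===== Notes on version B (the rewrite author's own statement) =====
-- stated objective: alternative
-- what changed: B splits the text on ' ' into independent segments and wraps each one with a greedy per-segment helper (tab expansion done up front, completed lines and raw leftover returned separately), instead of A's single character loop that mixes newline handling, tab expansion and wrapping in one running state.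
import Mathlib
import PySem

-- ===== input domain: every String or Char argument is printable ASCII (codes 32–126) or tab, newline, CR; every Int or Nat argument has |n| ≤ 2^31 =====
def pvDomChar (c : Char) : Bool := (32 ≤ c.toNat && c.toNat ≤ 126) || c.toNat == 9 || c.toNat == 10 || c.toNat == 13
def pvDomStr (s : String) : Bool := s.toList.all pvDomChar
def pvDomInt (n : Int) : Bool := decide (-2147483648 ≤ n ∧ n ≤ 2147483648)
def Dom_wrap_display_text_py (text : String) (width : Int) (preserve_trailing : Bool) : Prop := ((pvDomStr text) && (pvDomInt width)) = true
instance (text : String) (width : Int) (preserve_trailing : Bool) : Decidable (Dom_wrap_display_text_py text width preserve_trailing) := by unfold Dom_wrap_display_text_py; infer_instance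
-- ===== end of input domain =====

-- B re-decomposes the wrap: split on '\n' into independent segments and greedily wrap each one
-- (same return value; objective: a different decomposition, not speed).

-- ===== PORT A =====
-- _char_cell_width: exact on the ASCII(+tab/newline/CR) input domain, where no character is
-- combining and none has east-asian width 'W'/'F' (unicodedata is only consulted outside it).
def pvCellWidth (c : Char) : Int :=
  if c = '\t' then 4 else if c = '\n' ∨ c = '\r' then 0 else 1

-- `current if preserve_trailing else current.rstrip()` (strings carried as List Char)
def pvFinish (pt : Bool) (cur : List Char) : List Char :=
  if pt then cur else PySem.Chars.rstrip cur

-- body of A's inner `for item in chunk` loop; state = (lines, current, current_width)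
def pvAInner (width : Int) (pt : Bool)
    (st : List (List Char) × List Char × Int) (item : Char) :
    List (List Char) × List Char × Int :=
  let w := pvCellWidth item
  let st := if st.2.1 ≠ [] ∧ width < st.2.2 + w
            then (st.1 ++ [pvFinish pt st.2.1], ([] : List Char), (0 : Int))
            else st
  (st.1, st.2.1 ++ [item], st.2.2 + w)

-- body of A's outer `for char in text` loop
def pvAStep (width : Int) (pt : Bool)
    (st : List (List Char) × List Char × Int) (c : Char) :
    List (List Char) × List Char × Int :=
  if c = '\n' then (st.1 ++ [pvFinish pt st.2.1], [], 0)
  else (if c = '\t' then [' ', ' ', ' ', ' '] else [c]).foldl (pvAInner width pt) st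

def wrap_display_text_py (text : String) (width : Int) (preserve_trailing : Bool) : List String :=
  let width := max width 1
  let st := text.toList.foldl (pvAStep width preserve_trailing) ([], [], 0)
  let lines := if st.2.1 ≠ [] ∨ st.1 = [] then st.1 ++ [pvFinish preserve_trailing st.2.1] else st.1
  lines.map String.mk

-- ===== PORT B =====
-- `''.join('    ' if ch == '\t' else ch for ch in seg)`
def pvExpand (seg : List Char) : List Char :=
  seg.flatMap (fun c => if c = '\t' then [' ', ' ', ' ', ' '] else [c])

-- body of _wrap_segment's loop; state = (done, cur, cw)
def pvBStep (width : Int) (pt : Bool)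
    (st : List (List Char) × List Char × Int) (ch : Char) :
    List (List Char) × List Char × Int :=
  let w := pvCellWidth ch
  if st.2.1 ≠ [] ∧ width < st.2.2 + w
  then (st.1 ++ [pvFinish pt st.2.1], [ch], w)
  else (st.1, st.2.1 ++ [ch], st.2.2 + w)

-- _wrap_segment: returns (done, cur, cw); the Python returns (done, cur) — cw is its dead local at exit
def pvWrapSeg (width : Int) (pt : Bool) (seg : List Char) :
    List (List Char) × List Char × Int :=
  (pvExpand seg).foldl (pvBStep width pt) ([], [], 0)

def wrap_display_text_py_alt (text : String) (width : Int) (preserve_trailing : Bool) : List String :=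
  let width := max width 1
  let segs := text.toList.splitOn '\n'        -- text.split('\n') (single-char separator)
  let lines := segs.dropLast.foldl (fun lines seg =>   -- for seg in segs[:-1]
      let r := pvWrapSeg width preserve_trailing seg
      lines ++ r.1 ++ [pvFinish preserve_trailing r.2.1]) []
  let r := pvWrapSeg width preserve_trailing ((segs.getLast?).getD [])   -- segs[-1]
  let lines := lines ++ r.1
  let lines := if r.2.1 ≠ [] ∨ lines = [] then lines ++ [pvFinish preserve_trailing r.2.1] else lines
  lines.map String.mk

-- ===== PRECONDITION & SPEC =====
def Spec_wrap_display_text_py (text : String) (width : Int) (preserve_trailing : Bool) (out : List String) : Prop := out = wrap_display_text_py_alt text width preserve_trailing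
instance (text : String) (width : Int) (preserve_trailing : Bool) (out : List String) : Decidable (Spec_wrap_display_text_py text width preserve_trailing out) := by unfold Spec_wrap_display_text_py; infer_instance

-- ===== CLAIM (what is proved, stated in full; the proofs are below) =====
def Claim_equal_wrap_display_text_py : Prop := ∀ (text : String) (width : Int) (preserve_trailing : Bool), Dom_wrap_display_text_py text width preserve_trailing → Spec_wrap_display_text_py text width preserve_trailing (wrap_display_text_py text width preserve_trailing)

-- ===== LEMMAS AND PROOFS =====

-- A's inner step and B's wrap step are the same state transformer.
theorem pvAInner_eq_pvBStep (width : Int) (pt : Bool) :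
    pvAInner width pt = pvBStep width pt := by
  funext st item
  unfold pvAInner pvBStep
  by_cases h : st.2.1 ≠ [] ∧ width < st.2.2 + pvCellWidth item <;> simp [h]

-- On a non-newline char, A's outer step is B's wrap fold over that char's expansion.
theorem pvAStep_of_ne_newline (width : Int) (pt : Bool)
    (st : List (List Char) × List Char × Int) (c : Char) (h : c ≠ '\n') :
    pvAStep width pt st c = (pvExpand [c]).foldl (pvBStep width pt) st := by
  unfold pvAStep pvExpand
  simp [h, pvAInner_eq_pvBStep]

-- The wrap fold only ever appends to the `done` list: the accumulator splits off.
theorem pvBfold_acc (width : Int) (pt : Bool) :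
    ∀ (cs : List Char) (L : List (List Char)) (cur : List Char) (cw : Int),
      cs.foldl (pvBStep width pt) (L, cur, cw) =
        (L ++ (cs.foldl (pvBStep width pt) ([], cur, cw)).1,
         (cs.foldl (pvBStep width pt) ([], cur, cw)).2.1,
         (cs.foldl (pvBStep width pt) ([], cur, cw)).2.2) := by
  intro cs
  induction cs with
  | nil => intro L cur cw; simp
  | cons c cs ih =>
    intro L cur cw
    have hstep : ∀ M : List (List Char),
        pvBStep width pt (M, cur, cw) c =
          (M ++ (pvBStep width pt ([], cur, cw) c).1,
           (pvBStep width pt ([], cur, cw) c).2.1,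
           (pvBStep width pt ([], cur, cw) c).2.2) := by
      intro M
      by_cases h : cur ≠ [] ∧ width < cw + pvCellWidth c <;> simp [pvBStep, h]
    simp only [List.foldl_cons, hstep L]
    rcases hr : pvBStep width pt ([], cur, cw) c with ⟨D, cur', cw'⟩
    dsimp only
    rw [ih (L ++ D) cur' cw', ih D cur' cw']
    simp

-- B's per-segment pipeline, written as recursion over the segment list.
def pvRunSegs (width : Int) (pt : Bool) :
    List (List Char) → List (List Char) → List Char → Int →
    List (List Char) × List Char × Int
  | [], L, cur, cw => (L, cur, cw)
  | [s], L, cur, cw =>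
      let r := (pvExpand s).foldl (pvBStep width pt) ([], cur, cw)
      (L ++ r.1, r.2.1, r.2.2)
  | s :: s' :: rest, L, cur, cw =>
      let r := (pvExpand s).foldl (pvBStep width pt) ([], cur, cw)
      pvRunSegs width pt (s' :: rest) (L ++ r.1 ++ [pvFinish pt r.2.1]) [] 0

-- Prepending a char to the first segment = first stepping the wrap fold with its expansion.
theorem pvRunSegs_modifyHead (width : Int) (pt : Bool) (c : Char)
    (segs : List (List Char)) (h : segs ≠ []) (L : List (List Char)) (cur : List Char) (cw : Int) :
    pvRunSegs width pt (segs.modifyHead (List.cons c)) L cur cw =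
      pvRunSegs width pt segs
        (L ++ ((pvExpand [c]).foldl (pvBStep width pt) ([], cur, cw)).1)
        ((pvExpand [c]).foldl (pvBStep width pt) ([], cur, cw)).2.1
        ((pvExpand [c]).foldl (pvBStep width pt) ([], cur, cw)).2.2 := by
  have hexp : ∀ s : List Char, pvExpand (c :: s) = pvExpand [c] ++ pvExpand s := by
    intro s; simp [pvExpand]
  match segs with
  | [] => exact absurd rfl h
  | [s] =>
    rcases h0 : (pvExpand [c]).foldl (pvBStep width pt) ([], cur, cw) with ⟨D0, c0, w0⟩
    simp only [List.modifyHead, pvRunSegs]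
    rw [hexp s, List.foldl_append, h0, pvBfold_acc width pt (pvExpand s) D0 c0 w0]
    simp [List.append_assoc]
  | s :: s' :: rest =>
    rcases h0 : (pvExpand [c]).foldl (pvBStep width pt) ([], cur, cw) with ⟨D0, c0, w0⟩
    simp only [List.modifyHead, pvRunSegs]
    rw [hexp s, List.foldl_append, h0, pvBfold_acc width pt (pvExpand s) D0 c0 w0]
    simp [List.append_assoc]

-- MAIN INVARIANT: A's character loop equals B's segment pipeline over splitOn '\n'.
theorem pvMain (width : Int) (pt : Bool) :
    ∀ (cs : List Char) (L : List (List Char)) (cur : List Char) (cw : Int),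
      cs.foldl (pvAStep width pt) (L, cur, cw) =
        pvRunSegs width pt (cs.splitOn '\n') L cur cw := by
  intro cs
  induction cs with
  | nil => intro L cur cw; simp [List.splitOn, List.splitOnP_nil, pvRunSegs, pvExpand]
  | cons c cs ih =>
    intro L cur cw
    by_cases h : c = '\n'
    · subst h
      simp only [List.foldl_cons, pvAStep]
      rw [ih]
      simp only [List.splitOn, List.splitOnP_cons, beq_self_eq_true, if_pos]
      rcases hne : List.splitOnP (fun x => x == '\n') cs with _ | ⟨s, rest⟩
      · exact absurd hne (List.splitOnP_ne_nil _ _)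
      · simp [pvRunSegs, pvExpand]
    · simp only [List.foldl_cons]
      rw [pvAStep_of_ne_newline width pt _ c h, ih]
      simp only [List.splitOn, List.splitOnP_cons, beq_iff_eq, h, if_neg, not_false_iff]
      rw [pvBfold_acc width pt (pvExpand [c]) L cur cw]
      rw [pvRunSegs_modifyHead width pt c _ (List.splitOnP_ne_nil _ _)]

-- The segment pipeline, unrolled to B's port shape (flatMap over all but the last segment).
theorem pvRunSegs_spec (width : Int) (pt : Bool) :
    ∀ (segs : List (List Char)), segs ≠ [] → ∀ (L : List (List Char)),
      pvRunSegs width pt segs L [] 0 =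
        (L ++ segs.dropLast.flatMap
            (fun s => (pvWrapSeg width pt s).1 ++ [pvFinish pt (pvWrapSeg width pt s).2.1])
          ++ (pvWrapSeg width pt ((segs.getLast?).getD [])).1,
         (pvWrapSeg width pt ((segs.getLast?).getD [])).2.1,
         (pvWrapSeg width pt ((segs.getLast?).getD [])).2.2) := by
  intro segs
  induction segs with
  | nil => intro h; exact absurd rfl h
  | cons s rest ih =>
    intro _ L
    match rest with
    | [] => simp [pvRunSegs, pvWrapSeg]
    | s' :: rest' =>
      simp only [pvRunSegs]
      rw [ih (by simp)]
      simp [pvWrapSeg, List.flatMap_cons]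

-- ===== VERDICT (by name: the statement is the Claim_ definition above) =====
theorem wrap_display_text_py_spec : Claim_equal_wrap_display_text_py := by
  intro text width pt _
  unfold Spec_wrap_display_text_py
  simp only [wrap_display_text_py, wrap_display_text_py_alt]
  have hne : List.splitOn '\n' text.toList ≠ [] := List.splitOnP_ne_nil _ _
  have hfun : (fun (lines : List (List Char)) seg =>
        lines ++ (pvWrapSeg (max width 1) pt seg).1 ++ [pvFinish pt (pvWrapSeg (max width 1) pt seg).2.1])
      = (fun lines seg =>
        lines ++ ((pvWrapSeg (max width 1) pt seg).1 ++ [pvFinish pt (pvWrapSeg (max width 1) pt seg).2.1])) := by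
    funext lines seg; simp
  rw [pvMain (max width 1) pt text.toList [] [] 0,
      pvRunSegs_spec (max width 1) pt _ hne [],
      hfun,
      PySem.List.foldl_append_eq_flatMap
        (fun seg => (pvWrapSeg (max width 1) pt seg).1 ++ [pvFinish pt (pvWrapSeg (max width 1) pt seg).2.1])]
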